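-- pv_equiv track=rewrite | github.com/Ascend/MindSpeed-Core-MS | mindspeed_ms/tools/register/config.py | find_next_comma
-- ===== SOURCE A (Python) =====
-- def find_next_comma(val_str):
--     """find the position of next comma in the string.
--
--     note:
--         '(' and ')' or '[' and']' must appear in pairs or not exist.
--     """
--     if val_str.count('(') != val_str.count(')') or \
--            (val_str.count('[') != val_str.count(']')):
--         raise ValueError("( and ) or [ and ] must appear in pairs or not exist.")
--
--     end = len(val_str)
--     for idx, char in enumerate(val_str):
--         pre = val_str[:idx]
--         if ((char == ',') and (pre.count('(') == pre.count(')'))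
--                 and (pre.count('[') == pre.count(']'))):
--             end = idx
--             break
--     return end
-- ===== SOURCE B (Python) =====
-- def find_next_comma(val_str):
--     """find the position of next comma in the string (single pass, running depths)."""
--     if val_str.count('(') != val_str.count(')') or \
--            (val_str.count('[') != val_str.count(']')):
--         raise ValueError("( and ) or [ and ] must appear in pairs or not exist.")
--     d_paren = 0
--     d_brack = 0
--     for idx, char in enumerate(val_str):
--         if char == ',' and d_paren == 0 and d_brack == 0:
--             return idx
--         if char == '(':
--             d_paren += 1
--         elif char == ')':
--             d_paren -= 1
--         elif char == '[':
--             d_brack += 1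
--         elif char == ']':
--             d_brack -= 1
--     return len(val_str)
-- ===== Notes on version B (the rewrite author's own statement) =====
-- stated objective: faster
-- what changed: A re-counts the whole prefix's brackets at every index (quadratic); B makes one pass maintaining running paren/bracket depth counters.
import Mathlib
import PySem

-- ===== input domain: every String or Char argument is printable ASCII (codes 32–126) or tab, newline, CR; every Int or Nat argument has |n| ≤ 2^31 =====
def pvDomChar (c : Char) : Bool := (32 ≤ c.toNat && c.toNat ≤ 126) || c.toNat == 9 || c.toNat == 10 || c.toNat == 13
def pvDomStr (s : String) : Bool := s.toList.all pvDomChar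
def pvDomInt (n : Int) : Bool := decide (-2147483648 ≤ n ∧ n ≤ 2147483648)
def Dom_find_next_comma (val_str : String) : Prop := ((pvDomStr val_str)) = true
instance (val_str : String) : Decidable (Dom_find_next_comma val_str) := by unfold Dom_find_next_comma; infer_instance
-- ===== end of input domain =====

-- B replaces A's per-index re-count of the whole prefix by one pass with running depth counters (faster).
-- Both Pythons raise ValueError on unbalanced brackets; Pre_ excludes exactly those inputs.

-- ===== PORT A =====
-- str.count(c) for a single character is exactly List.count on the code points (exact on this use).
-- A's loop with break: scan enumerate(val_str); for each idx take the prefix val_str[:idx] and re-count.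
def pvALoop (s : List Char) : List Char → Nat → Int
  | [], _ => (s.length : Int)
  | c :: rest, idx =>
      let pre := s.take idx
      if c = ',' ∧ pre.count '(' = pre.count ')' ∧ pre.count '[' = pre.count ']' then
        (idx : Int)
      else
        pvALoop s rest (idx + 1)

def find_next_comma (val_str : String) : Int :=
  pvALoop val_str.toList val_str.toList 0

-- ===== PORT B =====
-- single pass: d_paren / d_brack are the running depths of the already-scanned prefix.
def pvBLoop (total : Nat) : List Char → Nat → Int → Int → Int
  | [], _, _, _ => (total : Int)
  | c :: rest, idx, dParen, dBrack =>
      if c = ',' ∧ dParen = 0 ∧ dBrack = 0 then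
        (idx : Int)
      else
        pvBLoop total rest (idx + 1)
          (if c = '(' then dParen + 1 else if c = ')' then dParen - 1 else dParen)
          (if c = '[' then dBrack + 1 else if c = ']' then dBrack - 1 else dBrack)

def find_next_comma_alt (val_str : String) : Int :=
  pvBLoop val_str.toList.length val_str.toList 0 0 0

-- ===== PRECONDITION & SPEC =====
-- Pre_ excludes exactly the inputs on which Python A raises ValueError: unbalanced '('/')' or '['/']' counts.
def Pre_find_next_comma (val_str : String) : Prop :=
  val_str.toList.count '(' = val_str.toList.count ')' ∧
  val_str.toList.count '[' = val_str.toList.count ']'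
instance (val_str : String) : Decidable (Pre_find_next_comma val_str) := by
  unfold Pre_find_next_comma; infer_instance

def pvWitness_find_next_comma : String := "(a,b),c"

def Spec_find_next_comma (val_str : String) (out : Int) : Prop := out = find_next_comma_alt val_str
instance (val_str : String) (out : Int) : Decidable (Spec_find_next_comma val_str out) := by unfold Spec_find_next_comma; infer_instance

-- ===== CLAIM (what is proved, stated in full; the proofs are below) =====
def Claim_equal_find_next_comma : Prop := ∀ (val_str : String), Dom_find_next_comma val_str → Pre_find_next_comma val_str → Spec_find_next_comma val_str (find_next_comma val_str)

-- ===== LEMMAS AND PROOFS =====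

-- Invariant: if rest is the suffix of s starting at idx, A's loop from idx equals B's loop
-- from idx with the depths of the prefix s.take idx.
lemma pvLoop_agree (s : List Char) :
    ∀ (rest : List Char) (idx : Nat), s.drop idx = rest →
      pvALoop s rest idx =
        pvBLoop s.length rest idx
          (((s.take idx).count '(' : Int) - ((s.take idx).count ')' : Int))
          (((s.take idx).count '[' : Int) - ((s.take idx).count ']' : Int)) := by
  intro rest
  induction rest with
  | nil => intro idx _; simp [pvALoop, pvBLoop]
  | cons c rest ih =>
      intro idx hdrop
      have hidx : idx < s.length := by
        by_contra h
        have h0 : s.drop idx = [] := List.drop_eq_nil_of_le (by omega)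
        rw [h0] at hdrop; exact List.cons_ne_nil c rest hdrop.symm
      have hget : s[idx] = c := by
        have h0 := (List.getElem_drop (xs := s) (i := idx) (j := 0) (h := by simpa using hidx))
        simpa [hdrop] using h0.symm
      have htake : s.take (idx + 1) = s.take idx ++ [c] := by
        rw [List.take_add_one]
        simp [List.getElem?_eq_getElem hidx, hget]
      have hcond :
          (c = ',' ∧ (s.take idx).count '(' = (s.take idx).count ')' ∧
            (s.take idx).count '[' = (s.take idx).count ']') ↔
          (c = ',' ∧
            (((s.take idx).count '(' : Int) - ((s.take idx).count ')' : Int)) = 0 ∧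
            (((s.take idx).count '[' : Int) - ((s.take idx).count ']' : Int)) = 0) := by
        constructor <;> rintro ⟨h1, h2, h3⟩ <;> exact ⟨h1, by omega, by omega⟩
      rw [pvALoop, pvBLoop]
      by_cases h : c = ',' ∧ (s.take idx).count '(' = (s.take idx).count ')' ∧
          (s.take idx).count '[' = (s.take idx).count ']'
      · rw [if_pos h, if_pos (hcond.mp h)]
      · rw [if_neg h, if_neg (fun hb => h (hcond.mpr hb))]
        have hdrop' : s.drop (idx + 1) = rest := by
          rw [← List.drop_drop, hdrop]; rfl
        rw [ih (idx + 1) hdrop']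
        congr 1 <;> rw [htake] <;> simp [List.count_append, List.count_singleton] <;>
          by_cases hc1 : c = '(' <;> by_cases hc2 : c = ')' <;>
          by_cases hc3 : c = '[' <;> by_cases hc4 : c = ']' <;>
          simp_all <;> omega

-- ===== VERDICT (by name: the statement is the Claim_ definition above) =====
theorem find_next_comma_spec : Claim_equal_find_next_comma := by
  intro val_str _ _
  unfold Spec_find_next_comma find_next_comma find_next_comma_alt
  simpa using pvLoop_agree val_str.toList val_str.toList 0 (by simp)
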